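-- pv_equiv track=rewrite | github.com/gfalcon2/Aerobraking-Trajectory-Simulator | ABTS/utils/misc.py | find_neighbour
-- ===== SOURCE A (Python) =====
-- def find_neighbour(point, list):
--     dist_list = [abs(point-p) for p in list]
--     temp = sorted(set(dist_list))
--     index_1 = dist_list.index(temp[0])
--     index_2 = dist_list.index(temp[1])
--     # index_sorted = sorted(set(range(len(dist_list)),key=dist_list.__getitem__))
--
--     temp = (point-list[index_1]), (point-list[index_2])
--     temp_index = [index_1,index_2]
--     index_sorted = sorted(range(len(temp)),key=temp.__getitem__)
--
--     return temp_index[index_sorted[0]],temp_index[index_sorted[1]], (temp[index_sorted[0]]), (temp[index_sorted[1]])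
-- ===== SOURCE B (Python) =====
-- def find_neighbour(point, list):
--     dists = [abs(point - p) for p in list]
--     d1 = min(dists)
--     d2 = min(d for d in dists if d > d1)
--     i1 = dists.index(d1)
--     i2 = dists.index(d2)
--     s1 = point - list[i1]
--     s2 = point - list[i2]
--     if s1 <= s2:
--         return i1, i2, s1, s2
--     return i2, i1, s2, s1
-- ===== Notes on version B (the rewrite author's own statement) =====
-- stated objective: faster
-- what changed: A builds the distance list, deduplicates it into a set and sorts it to read off the two smallest distinct distances; B never sorts: it takes min of the distances and then min of the distances strictly greater than it, then orders the two signed offsets with a single comparison instead of sorting index pairs.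
import Mathlib
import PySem

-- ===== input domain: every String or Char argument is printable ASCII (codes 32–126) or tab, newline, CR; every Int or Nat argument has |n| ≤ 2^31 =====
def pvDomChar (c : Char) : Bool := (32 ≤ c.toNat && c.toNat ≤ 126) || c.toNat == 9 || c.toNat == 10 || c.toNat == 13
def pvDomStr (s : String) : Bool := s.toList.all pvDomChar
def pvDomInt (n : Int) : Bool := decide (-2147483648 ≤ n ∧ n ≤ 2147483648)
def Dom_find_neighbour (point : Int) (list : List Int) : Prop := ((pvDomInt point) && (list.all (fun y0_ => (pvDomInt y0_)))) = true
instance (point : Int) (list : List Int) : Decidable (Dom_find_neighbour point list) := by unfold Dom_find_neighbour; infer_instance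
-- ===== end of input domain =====

-- B removes the sort/set pass: min and min-of-strictly-greater in linear passes (objective: faster).

-- ===== PORT A =====
def find_neighbour (point : Int) (list : List Int) : List Int :=
  let dist_list := list.map (fun p => |point - p|)
  let temp := PySem.List.sorted (PySem.Set.ofList dist_list) (fun x => x) false
  match PySem.List.pyGet? temp 0, PySem.List.pyGet? temp 1 with
  | some t0, some t1 =>
    match PySem.List.index? dist_list t0, PySem.List.index? dist_list t1 with
    | some n1, some n2 =>
      let index_1 : Int := n1
      let index_2 : Int := n2
      let temp2 : List Int := [point - PySem.List.pyGetD list index_1 0, point - PySem.List.pyGetD list index_2 0]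
      let temp_index : List Int := [index_1, index_2]
      let index_sorted := PySem.List.sorted (PySem.List.pyRange 0 (temp2.length : Int) 1) (fun j => PySem.List.pyGetD temp2 j 0) false
      [PySem.List.pyGetD temp_index (PySem.List.pyGetD index_sorted 0 0) 0,
       PySem.List.pyGetD temp_index (PySem.List.pyGetD index_sorted 1 0) 0,
       PySem.List.pyGetD temp2 (PySem.List.pyGetD index_sorted 0 0) 0,
       PySem.List.pyGetD temp2 (PySem.List.pyGetD index_sorted 1 0) 0]
    | _, _ => []   -- unreachable under Pre_ (Python: ValueError)
  | _, _ => []     -- IndexError: fewer than two distinct distances — excluded by Pre_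

-- ===== PORT B =====
def find_neighbour_alt (point : Int) (list : List Int) : List Int :=
  let dists := list.map (fun p => |point - p|)
  match PySem.List.min? dists (fun x => x) with
  | none => []     -- ValueError: empty list — excluded by Pre_
  | some d1 =>
    match PySem.List.min? (dists.filter (fun d => decide (d1 < d))) (fun x => x) with
    | none => []   -- ValueError: no strictly larger distance — excluded by Pre_
    | some d2 =>
      let i1 : Int := ((PySem.List.index? dists d1).getD 0 : Nat)
      let i2 : Int := ((PySem.List.index? dists d2).getD 0 : Nat)
      let s1 := point - PySem.List.pyGetD list i1 0
      let s2 := point - PySem.List.pyGetD list i2 0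
      if s1 ≤ s2 then [i1, i2, s1, s2] else [i2, i1, s2, s1]

-- ===== PRECONDITION & SPEC =====
-- Pre_: at least two distinct distances occur (otherwise Python A raises IndexError on temp[1],
-- and on the empty list on temp[0]); exactly the inputs on which A returns normally.
def Pre_find_neighbour (point : Int) (list : List Int) : Prop :=
  2 ≤ (PySem.Set.ofList (list.map (fun p => |point - p|))).length
instance (point : Int) (list : List Int) : Decidable (Pre_find_neighbour point list) := by
  unfold Pre_find_neighbour; infer_instance
def pvWitness_find_neighbour : Int × List Int := (0, [1, 3])
def Spec_find_neighbour (point : Int) (list : List Int) (out : List Int) : Prop := out = find_neighbour_alt point list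
instance (point : Int) (list : List Int) (out : List Int) : Decidable (Spec_find_neighbour point list out) := by unfold Spec_find_neighbour; infer_instance

-- ===== CLAIM (what is proved, stated in full; the proofs are below) =====
def Claim_equal_find_neighbour : Prop := ∀ (point : Int) (list : List Int), Dom_find_neighbour point list → Pre_find_neighbour point list → Spec_find_neighbour point list (find_neighbour point list)

-- ===== LEMMAS AND PROOFS =====

-- sorted of a two-element list under a key: one comparison (stable: tie keeps order)
lemma sorted_pair (a b : Int) (key : Int → Int) :
    PySem.List.sorted [a, b] key false = if key b < key a then [b, a] else [a, b] := by
  split_ifs with h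
  · exact PySem.List.sorted_eq_of_perm_of_pairwise_lt _ _ _ (List.Perm.swap a b [])
      (by simpa [List.pairwise_cons] using h)
  · exact PySem.List.sorted_eq_self_of_pairwise _ _ (by simp [List.pairwise_cons]; omega)

-- ===== VERDICT (by name: the statement is the Claim_ definition above) =====
theorem find_neighbour_spec : Claim_equal_find_neighbour := by
  intro point list _ hpre
  unfold Spec_find_neighbour find_neighbour find_neighbour_alt
  set ds := list.map (fun p => |point - p|) with hds
  have hlen : 2 ≤ (PySem.List.sorted (PySem.Set.ofList ds) (fun x => x) false).length := by
    rw [PySem.List.length_sorted]; exact hpre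
  obtain ⟨t0, tl, hSeq0⟩ := List.exists_cons_of_ne_nil
    (l := PySem.List.sorted (PySem.Set.ofList ds) (fun x => x) false)
    (by intro h; rw [h] at hlen; simp at hlen)
  obtain ⟨t1, rest, hSeq1⟩ := List.exists_cons_of_ne_nil (l := tl)
    (by intro h; rw [hSeq0, h] at hlen; simp at hlen)
  have hSeq : PySem.List.sorted (PySem.Set.ofList ds) (fun x => x) false = t0 :: t1 :: rest := by
    rw [hSeq0, hSeq1]
  have hpw : List.Pairwise (· < ·) (t0 :: t1 :: rest) := by
    rw [← hSeq]; exact PySem.List.sorted_ofList_pairwise_lt ds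
  have ht01 : t0 < t1 := (List.pairwise_cons.mp hpw).1 t1 (by simp)
  have ht0mem : t0 ∈ ds := by
    have : t0 ∈ PySem.List.sorted (PySem.Set.ofList ds) (fun x => x) false := by
      rw [hSeq]; simp
    rw [PySem.List.mem_sorted, PySem.Set.mem_ofList] at this; exact this
  have ht1mem : t1 ∈ ds := by
    have : t1 ∈ PySem.List.sorted (PySem.Set.ofList ds) (fun x => x) false := by
      rw [hSeq]; simp
    rw [PySem.List.mem_sorted, PySem.Set.mem_ofList] at this; exact this
  have hmin0 : ∀ y ∈ ds, t0 ≤ y := by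
    intro y hy
    exact PySem.List.key_head_sorted_le _ _ hSeq y ((PySem.Set.mem_ofList ds y).mpr hy)
  have hsecond : ∀ y ∈ ds, t0 < y → t1 ≤ y := by
    intro y hy hlt
    have : y ∈ PySem.List.sorted (PySem.Set.ofList ds) (fun x => x) false := by
      rw [PySem.List.mem_sorted, PySem.Set.mem_ofList]; exact hy
    rw [hSeq] at this
    rcases this with _ | ⟨_, this⟩
    · omega
    rcases this with _ | ⟨_, this⟩
    · rfl
    · exact le_of_lt ((List.pairwise_cons.mp (List.pairwise_cons.mp hpw).2).1 y this)
  -- B's first min is t0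
  obtain ⟨d1, hd1⟩ : ∃ d1, PySem.List.min? ds (fun x => x) = some d1 := by
    cases h : PySem.List.min? ds (fun x => x) with
    | none => rw [PySem.List.min?_eq_none_iff] at h; rw [h] at ht0mem; simp at ht0mem
    | some d => exact ⟨d, rfl⟩
  have hd1t0 : d1 = t0 :=
    le_antisymm (PySem.List.min?_isMin hd1 t0 ht0mem) (hmin0 d1 (PySem.List.min?_mem hd1))
  rw [hd1t0] at hd1
  clear hd1t0
  -- B's second min is t1
  have ht1f : t1 ∈ ds.filter (fun d => decide (t0 < d)) := by
    simp [List.mem_filter, ht1mem, ht01]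
  obtain ⟨d2, hd2⟩ : ∃ d2, PySem.List.min? (ds.filter (fun d => decide (t0 < d))) (fun x => x) = some d2 := by
    cases h : PySem.List.min? (ds.filter (fun d => decide (t0 < d))) (fun x => x) with
    | none => rw [PySem.List.min?_eq_none_iff] at h; rw [h] at ht1f; simp at ht1f
    | some d => exact ⟨d, rfl⟩
  have hd2mem := PySem.List.min?_mem hd2
  rw [List.mem_filter] at hd2mem
  have hd2t1 : d2 = t1 :=
    le_antisymm (PySem.List.min?_isMin hd2 t1 ht1f)
      (hsecond d2 hd2mem.1 (by simpa using hd2mem.2))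
  rw [hd2t1] at hd2
  clear hd2t1
  -- indices exist
  obtain ⟨n1, hn1⟩ : ∃ n1, PySem.List.index? ds t0 = some n1 :=
    Option.isSome_iff_exists.mp ((PySem.List.index?_isSome_iff ds t0).mpr ht0mem)
  obtain ⟨n2, hn2⟩ : ∃ n2, PySem.List.index? ds t1 = some n2 :=
    Option.isSome_iff_exists.mp ((PySem.List.index?_isSome_iff ds t1).mpr ht1mem)
  -- reduce both sides
  have hg0 : PySem.List.pyGet? (t0 :: t1 :: rest) 0 = some t0 := by simp [pysem]
  have hg1 : PySem.List.pyGet? (t0 :: t1 :: rest) 1 = some t1 := by simp [pysem]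
  simp only [hSeq, hg0, hg1, hd1, hd2, hn1, hn2, Option.getD_some]
  set s1 := point - PySem.List.pyGetD list (n1 : Int) 0 with hs1
  set s2 := point - PySem.List.pyGetD list (n2 : Int) 0 with hs2
  have hlen2 : (([s1, s2] : List Int).length : Int) = (2 : Int) := by simp
  rw [hlen2, show PySem.List.pyRange 0 (2 : Int) 1 = [(0 : Int), 1] from by decide, sorted_pair]
  have hk0 : PySem.List.pyGetD [s1, s2] (0 : Int) 0 = s1 := by
    rw [PySem.List.pyGetD_ofNat' [s1, s2] 0 0]; rfl
  have hk1 : PySem.List.pyGetD [s1, s2] (1 : Int) 0 = s2 := by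
    rw [PySem.List.pyGetD_ofNat' [s1, s2] 1 0]; rfl
  rw [hk0, hk1]
  have g0 : ∀ (a b : Int), PySem.List.pyGetD [a, b] (0 : Int) 0 = a := fun a b => by
    rw [PySem.List.pyGetD_ofNat' [a, b] 0 0]; rfl
  have g1 : ∀ (a b : Int), PySem.List.pyGetD [a, b] (1 : Int) 0 = b := fun a b => by
    rw [PySem.List.pyGetD_ofNat' [a, b] 1 0]; rfl
  by_cases h : s1 ≤ s2
  · rw [if_neg (by omega), if_pos h]
    simp only [g0, g1]
  · rw [if_pos (by omega), if_neg h]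
    simp only [g0, g1]
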